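-- pv_equiv track=rewrite | github.com/gunraj26/UBS_Team-Untitled | routes/operation_safegaurd.py | reverse_encode_index_parity
-- ===== SOURCE A (Python) =====
-- def reverse_encode_index_parity(text):
--     """Reverse the index parity encoding"""
--     words = text.split()
--     result = []
--
--     for word in words:
--         if len(word) <= 1:
--             result.append(word)
--             continue
--
--         # Split into even and odd parts
--         mid = (len(word) + 1) // 2
--         even_part = word[:mid]
--         odd_part = word[mid:]
--
--         # Reconstruct original word
--         original = ""
--         for i in range(len(even_part)):
--             original += even_part[i]
--             if i < len(odd_part):
--                 original += odd_part[i]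
--
--         result.append(original)
--
--     return ' '.join(result)
-- ===== SOURCE B (Python) =====
-- def reverse_encode_index_parity(text):
--     """Reverse the index parity encoding (strided slice assignment)."""
--     result = []
--     for word in text.split():
--         n = len(word)
--         mid = (n + 1) // 2
--         chars = [''] * n
--         chars[0::2] = word[:mid]
--         chars[1::2] = word[mid:]
--         result.append(''.join(chars))
--     return ' '.join(result)
-- ===== Notes on version B (the rewrite author's own statement) =====
-- stated objective: idiomatic
-- what changed: Per word, B allocates a slot list and fills the even and odd index positions by two strided slice assignments (chars[0::2]/chars[1::2]) and one join, instead of A's index loop that interleaves even_part/odd_part by repeated string concatenation; B needs no len<=1 special case.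
import Mathlib
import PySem

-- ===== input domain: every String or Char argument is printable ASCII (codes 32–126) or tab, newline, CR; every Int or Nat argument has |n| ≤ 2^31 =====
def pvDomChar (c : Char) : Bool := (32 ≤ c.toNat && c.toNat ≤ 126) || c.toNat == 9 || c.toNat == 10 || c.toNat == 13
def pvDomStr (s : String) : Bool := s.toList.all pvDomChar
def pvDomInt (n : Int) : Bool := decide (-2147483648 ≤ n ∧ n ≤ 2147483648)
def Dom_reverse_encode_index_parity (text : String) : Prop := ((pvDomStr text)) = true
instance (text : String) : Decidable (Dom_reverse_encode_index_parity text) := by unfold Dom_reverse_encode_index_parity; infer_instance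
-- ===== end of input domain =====

-- B fills a per-word slot list by two strided slice assignments (even then odd positions)
-- instead of A's per-index interleaving loop; same output, no len<=1 special case needed.

-- ===== PORT A =====
-- per-word body of A's for-loop: guard, split into even/odd halves, index loop interleaving them
def pvDecodeWordA (word : String) : String :=
  let w := word.toList
  if w.length ≤ 1 then word
  else
    let mid : Nat := (w.length + 1) / 2
    let e := PySem.List.slice w none (some (mid : Int))      -- word[:mid]
    let o := PySem.List.slice w (some (mid : Int)) none      -- word[mid:]
    String.ofList ((List.range e.length).foldl (fun acc i =>
      let acc2 := acc ++ [e[i]?.getD ' ']                    -- original += even_part[i] (index always in range)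
      if i < o.length then acc2 ++ [o[i]?.getD ' '] else acc2) [])

def reverse_encode_index_parity (text : String) : String :=
  let words := PySem.Str.split₀ text
  let result := words.foldl (fun res word => res ++ [pvDecodeWordA word]) []
  PySem.Str.join " " result

-- ===== PORT B =====
-- chars[start::2] = xs (strided slice assignment; the Python lengths always match exactly)
def pvSetStride (l : List Char) (start : Nat) (xs : List Char) : List Char :=
  match xs with
  | [] => l
  | x :: rest => pvSetStride (l.set start x) (start + 2) rest

def pvDecodeWordB (word : String) : String :=
  let w := word.toList
  let mid : Nat := (w.length + 1) / 2
  let chars := List.replicate w.length ' '   -- [''] * n; every slot is overwritten, ' ' is a placeholder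
  let chars := pvSetStride chars 0 (PySem.List.slice w none (some (mid : Int)))  -- chars[0::2] = word[:mid]
  let chars := pvSetStride chars 1 (PySem.List.slice w (some (mid : Int)) none)  -- chars[1::2] = word[mid:]
  String.ofList chars                        -- ''.join(chars)

def reverse_encode_index_parity_alt (text : String) : String :=
  PySem.Str.join " " ((PySem.Str.split₀ text).map pvDecodeWordB)

-- ===== PRECONDITION & SPEC =====
def Spec_reverse_encode_index_parity (text : String) (out : String) : Prop := out = reverse_encode_index_parity_alt text
instance (text : String) (out : String) : Decidable (Spec_reverse_encode_index_parity text out) := by unfold Spec_reverse_encode_index_parity; infer_instance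

-- ===== CLAIM (what is proved, stated in full; the proofs are below) =====
def Claim_equal_reverse_encode_index_parity : Prop := ∀ (text : String), Dom_reverse_encode_index_parity text → Spec_reverse_encode_index_parity text (reverse_encode_index_parity text)

-- ===== LEMMAS AND PROOFS =====

-- the common interleaving both programs compute (proof-only reference)
def pvIlv : List Char → List Char → List Char
  | [], _ => []
  | a :: e, [] => a :: pvIlv e []
  | a :: e, b :: o => a :: b :: pvIlv e o

theorem pv_loopA_eq_ilv (e o : List Char) (acc : List Char) :
    (List.range e.length).foldl (fun acc i =>
      let acc2 := acc ++ [e[i]?.getD ' ']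
      if i < o.length then acc2 ++ [o[i]?.getD ' '] else acc2) acc
    = acc ++ pvIlv e o := by
  induction e generalizing o acc with
  | nil => simp [pvIlv]
  | cons a e ih =>
    simp only [List.length_cons]
    rw [List.range_succ_eq_map]
    cases o with
    | nil =>
      simp only [List.foldl_cons, List.foldl_map]
      have h0 : (fun (acc : List Char) (i : Nat) =>
          let acc2 := acc ++ [(a :: e)[i.succ]?.getD ' ']
          if i.succ < ([] : List Char).length then acc2 ++ [([] : List Char)[i.succ]?.getD ' '] else acc2)
        = (fun (acc : List Char) (i : Nat) =>
          let acc2 := acc ++ [e[i]?.getD ' ']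
          if i < ([] : List Char).length then acc2 ++ [([] : List Char)[i]?.getD ' '] else acc2) := by
        funext acc i; simp
      rw [h0, ih []]
      simp [pvIlv]
    | cons b o =>
      simp only [List.foldl_cons, List.foldl_map]
      have h0 : (fun (acc : List Char) (i : Nat) =>
          let acc2 := acc ++ [(a :: e)[i.succ]?.getD ' ']
          if i.succ < (b :: o).length then acc2 ++ [(b :: o)[i.succ]?.getD ' '] else acc2)
        = (fun (acc : List Char) (i : Nat) =>
          let acc2 := acc ++ [e[i]?.getD ' ']
          if i < o.length then acc2 ++ [o[i]?.getD ' '] else acc2) := by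
        funext acc i; simp
      rw [h0, ih o]
      simp [pvIlv]

theorem pv_setStride_cons (l : List Char) (a : Char) (s : Nat) (xs : List Char) :
    pvSetStride (a :: l) (s + 1) xs = a :: pvSetStride l s xs := by
  induction xs generalizing l s a with
  | nil => simp [pvSetStride]
  | cons x rest ih =>
    show pvSetStride ((a :: l).set (s + 1) x) (s + 1 + 2) rest = _
    have : (a :: l).set (s + 1) x = a :: l.set s x := by simp
    rw [this, show s + 1 + 2 = (s + 2) + 1 from rfl, ih]
    rfl

theorem pv_stride_eq_ilv (e o : List Char) (h1 : o.length ≤ e.length) (h2 : e.length ≤ o.length + 1) :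
    pvSetStride (pvSetStride (List.replicate (e.length + o.length) ' ') 0 e) 1 o = pvIlv e o := by
  induction e generalizing o with
  | nil =>
    have : o = [] := by cases o <;> simp_all
    subst this; simp [pvSetStride, pvIlv]
  | cons a e ih =>
    cases o with
    | nil =>
      have he : e = [] := by
        simp only [List.length_cons, List.length_nil] at h2
        exact List.length_eq_zero_iff.mp (by omega)
      subst he
      simp [pvSetStride, pvIlv]
    | cons b o =>
      have hrep : List.replicate ((a :: e).length + (b :: o).length) ' '
          = ' ' :: ' ' :: List.replicate (e.length + o.length) ' ' := by
        simp only [List.length_cons]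
        rw [show e.length + 1 + (o.length + 1) = (e.length + o.length) + 1 + 1 by omega]
        simp [List.replicate_succ]
      rw [hrep]
      have hinner : pvSetStride (' ' :: ' ' :: List.replicate (e.length + o.length) ' ') 0 (a :: e)
          = a :: ' ' :: pvSetStride (List.replicate (e.length + o.length) ' ') 0 e := by
        show pvSetStride ((' ' :: ' ' :: List.replicate (e.length + o.length) ' ').set 0 a) (0 + 2) e = _
        rw [show (' ' :: ' ' :: List.replicate (e.length + o.length) ' ').set 0 a
            = a :: ' ' :: List.replicate (e.length + o.length) ' ' from rfl,
          show (0 + 2 : Nat) = 1 + 1 from rfl,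
          pv_setStride_cons (' ' :: List.replicate (e.length + o.length) ' ') a 1 e,
          show (1 : Nat) = 0 + 1 from rfl,
          pv_setStride_cons (List.replicate (e.length + o.length) ' ') ' ' 0 e]
      rw [hinner]
      have houter : ∀ X : List Char, pvSetStride (a :: ' ' :: X) 1 (b :: o)
          = a :: b :: pvSetStride X 1 o := by
        intro X
        show pvSetStride ((a :: ' ' :: X).set 1 b) (1 + 2) o = _
        rw [show (a :: ' ' :: X).set 1 b = a :: b :: X from rfl,
          show (1 + 2 : Nat) = (1 + 1) + 1 from rfl,
          pv_setStride_cons (b :: X) a (1 + 1) o,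
          pv_setStride_cons X b 1 o]
      rw [houter]
      have ih' := ih o (by simp only [List.length_cons] at h1; omega)
        (by simp only [List.length_cons] at h2; omega)
      rw [ih']
      rfl

theorem pv_word_eq (word : String) : pvDecodeWordA word = pvDecodeWordB word := by
  by_cases hle : word.toList.length ≤ 1
  · simp only [pvDecodeWordA, pvDecodeWordB, if_pos hle,
      PySem.List.slice_to_natCast, PySem.List.slice_from_natCast]
    interval_cases h : word.toList.length
    · have h0 : word.toList = [] := List.length_eq_zero_iff.mp h
      rw [h0]
      simp [pvSetStride]
      conv_lhs => rw [← String.ofList_toList (s := word), h0]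
    · obtain ⟨c, hc⟩ : ∃ c, word.toList = [c] := by
        cases hl : word.toList with
        | nil => simp [hl] at h
        | cons x t => cases t with
          | nil => exact ⟨x, rfl⟩
          | cons y t2 => simp [hl] at h
      rw [hc]
      simp [pvSetStride, List.replicate]
      conv_lhs => rw [← String.ofList_toList (s := word), hc]
  · simp only [pvDecodeWordA, pvDecodeWordB, if_neg hle,
      PySem.List.slice_to_natCast, PySem.List.slice_from_natCast]
    generalize word.toList = w at hle ⊢
    set mid : Nat := (w.length + 1) / 2 with hmid
    have hmidle : mid ≤ w.length := by omega
    have hle' : (w.take mid).length = mid := by simp [hmidle]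
    have hlo : (w.drop mid).length = w.length - mid := by simp
    have h1 : (w.drop mid).length ≤ (w.take mid).length := by rw [hle', hlo]; omega
    have h2 : (w.take mid).length ≤ (w.drop mid).length + 1 := by rw [hle', hlo]; omega
    have hn : (w.take mid).length + (w.drop mid).length = w.length := by rw [hle', hlo]; omega
    rw [pv_loopA_eq_ilv (w.take mid) (w.drop mid) [],
      show List.replicate w.length ' ' = List.replicate ((w.take mid).length + (w.drop mid).length) ' ' by rw [hn],
      pv_stride_eq_ilv _ _ h1 h2]
    simp

theorem pv_foldl_append_eq_map (f : String → String) (l : List String) (acc : List String) :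
    l.foldl (fun res word => res ++ [f word]) acc = acc ++ l.map f := by
  induction l generalizing acc with
  | nil => simp
  | cons x t ih => simp [List.foldl_cons, ih]

-- ===== VERDICT (by name: the statement is the Claim_ definition above) =====
theorem reverse_encode_index_parity_spec : Claim_equal_reverse_encode_index_parity := by
  intro text _
  show reverse_encode_index_parity text = reverse_encode_index_parity_alt text
  simp only [reverse_encode_index_parity, reverse_encode_index_parity_alt]
  rw [pv_foldl_append_eq_map]
  simp only [List.nil_append]
  congr 1
  exact List.map_congr_left (fun w _ => pv_word_eq w)
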